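-- pv_equiv track=rewrite | github.com/nastyh/LeetCode | Basic Data Structures/043_Multiply_Strings.py | multiply_ord
-- ===== SOURCE A (Python) =====
-- def multiply_ord(num1, num2):  # O(n) and O(1)
--     int_num1 = 0
--     for i in num1:
--         int_num1 = int_num1 * 10
--         int_num1 += (ord(i) - ord('0'))
--
--     int_num2 = 0
--     for i in num2:
--         int_num2 = int_num2 * 10
--         int_num2 += (ord(i) - ord('0'))
--     return str(int_num1 * int_num2)
-- ===== SOURCE B (Python) =====
-- def multiply_ord(num1, num2):
--     # Grade-school multiplication on per-character digit values (convolution),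
--     # then a single Horner pass combines the buffer into the integer product.
--     d1 = [ord(c) - ord('0') for c in num1]
--     d2 = [ord(c) - ord('0') for c in num2]
--     buf = [0] * (len(d1) + len(d2) - 1) if d1 and d2 else []
--     for i, a in enumerate(d1):
--         for j, b in enumerate(d2):
--             buf[i + j] += a * b
--     total = 0
--     for v in buf:
--         total = total * 10 + v
--     return str(total)
-- ===== Notes on version B (the rewrite author's own statement) =====
-- stated objective: alternative
-- what changed: Replaces parse-both-strings-then-one-bigint-multiply with grade-school multiplication: per-character values are convolved into a position buffer by a double loop and a single Horner pass turns the buffer into the product.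
import Mathlib
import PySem

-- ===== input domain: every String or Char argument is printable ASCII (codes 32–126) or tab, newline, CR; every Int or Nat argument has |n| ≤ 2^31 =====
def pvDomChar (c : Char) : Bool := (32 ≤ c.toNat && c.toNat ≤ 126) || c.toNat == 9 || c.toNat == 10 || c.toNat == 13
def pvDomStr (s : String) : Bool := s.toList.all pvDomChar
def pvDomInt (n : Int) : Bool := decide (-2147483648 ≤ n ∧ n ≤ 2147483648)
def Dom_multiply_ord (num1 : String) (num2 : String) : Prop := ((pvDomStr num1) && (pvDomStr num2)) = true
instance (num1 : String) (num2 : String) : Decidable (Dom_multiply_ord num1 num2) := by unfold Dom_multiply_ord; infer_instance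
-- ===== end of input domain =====

-- B replaces A's parse-both-then-bigint-multiply with grade-school convolution
-- into a position buffer plus one Horner pass (alternative decomposition).

-- ===== PORT A =====
def multiply_ord (num1 : String) (num2 : String) : String :=
  let int_num1 := num1.toList.foldl (fun acc c => acc * 10 + ((c.toNat : Int) - 48)) 0
  let int_num2 := num2.toList.foldl (fun acc c => acc * 10 + ((c.toNat : Int) - 48)) 0
  PySem.Int.toStr (int_num1 * int_num2)

-- ===== PORT B =====
def multiply_ord_alt (num1 : String) (num2 : String) : String :=
  let d1 : List Int := num1.toList.map (fun c => (c.toNat : Int) - 48)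
  let d2 : List Int := num2.toList.map (fun c => (c.toNat : Int) - 48)
  let buf0 : List Int := if d1 ≠ [] ∧ d2 ≠ [] then List.replicate (d1.length + d2.length - 1) 0 else []
  let buf := (PySem.List.enumerate d1).foldl (fun b p =>
      (PySem.List.enumerate d2).foldl (fun b q =>
        PySem.List.pySetD b (p.1 + q.1) (PySem.List.pyGetD b (p.1 + q.1) 0 + p.2 * q.2)) b) buf0
  let total := buf.foldl (fun a v => a * 10 + v) 0
  PySem.Int.toStr total

-- ===== PRECONDITION & SPEC =====
def Spec_multiply_ord (num1 : String) (num2 : String) (out : String) : Prop := out = multiply_ord_alt num1 num2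
instance (num1 : String) (num2 : String) (out : String) : Decidable (Spec_multiply_ord num1 num2 out) := by unfold Spec_multiply_ord; infer_instance

-- ===== CLAIM (what is proved, stated in full; the proofs are below) =====
def Claim_equal_multiply_ord : Prop := ∀ (num1 : String) (num2 : String), Dom_multiply_ord num1 num2 → Spec_multiply_ord num1 num2 (multiply_ord num1 num2)

-- ===== LEMMAS AND PROOFS =====

/-- Horner evaluation of a most-significant-first digit list. -/
def pvH (l : List Int) : Int := l.foldl (fun a v => a * 10 + v) 0

theorem pvH_def (l : List Int) : l.foldl (fun a v => a * 10 + v) 0 = pvH l := rfl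

theorem pvH_init (l : List Int) : ∀ a : Int, l.foldl (fun a v => a * 10 + v) a = a * 10 ^ l.length + pvH l := by
  induction l with
  | nil => intro a; simp [pvH]
  | cons d t ih =>
      intro a
      simp only [List.foldl_cons, List.length_cons]
      have hc : pvH (d :: t) = List.foldl (fun a v => a * 10 + v) (0 * 10 + d) t := rfl
      rw [ih (a * 10 + d), hc, ih (0 * 10 + d)]
      ring

theorem pvH_cons (d : Int) (t : List Int) : pvH (d :: t) = d * 10 ^ t.length + pvH t := by
  have hc : pvH (d :: t) = List.foldl (fun a v => a * 10 + v) (0 * 10 + d) t := rfl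
  rw [hc, pvH_init]
  ring

theorem pvH_set (x : Int) : ∀ (buf : List Int) (k e : Nat), k + 1 + e = buf.length →
    pvH (buf.set k (buf.getD k 0 + x)) = pvH buf + x * 10 ^ e := by
  intro buf
  induction buf with
  | nil => intro k e h; simp at h
  | cons d t ih =>
      intro k e h
      cases k with
      | zero =>
          simp only [List.length_cons] at h
          have he : e = t.length := by omega
          subst he
          simp only [List.set_cons_zero, List.getD_cons_zero]
          rw [pvH_cons, pvH_cons]
          ring
      | succ k' =>
          simp only [List.length_cons] at h
          simp only [List.set_cons_succ, List.getD_cons_succ]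
          rw [pvH_cons, pvH_cons, ih k' e (by omega), List.length_set]
          ring

theorem pvLen_foldl {β : Type} (g : List Int → β → List Int)
    (hg : ∀ b q, (g b q).length = b.length) :
    ∀ (l : List β) (B : List Int), (l.foldl g B).length = B.length := by
  intro l
  induction l with
  | nil => intro B; simp
  | cons p t ih => intro B; simp only [List.foldl_cons]; rw [ih, hg]

/-- Inner loop: one row of the convolution adds a · pvH t · 10^e. -/
theorem pvInner (a : Int) :
    ∀ (t : List Int) (j0 i e : Nat) (B : List Int), i + j0 + t.length + e = B.length →
    pvH ((PySem.List.enumerate t (j0 : Int)).foldl (fun b q =>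
        PySem.List.pySetD b ((i : Int) + q.1) (PySem.List.pyGetD b ((i : Int) + q.1) 0 + a * q.2)) B)
      = pvH B + a * pvH t * 10 ^ e := by
  intro t
  induction t with
  | nil => intro j0 i e B h; simp [PySem.List.enumerate_nil, pvH]
  | cons d t ih =>
      intro j0 i e B h
      simp only [List.length_cons] at h
      rw [PySem.List.enumerate_cons, List.foldl_cons]
      have hc : (i : Int) + (j0 : Int) = ((i + j0 : Nat) : Int) := by push_cast; ring
      rw [hc, PySem.List.pySetD_natCast, PySem.List.pyGetD_natCast]
      have hcast : ((j0 : Int) + 1) = ((j0 + 1 : Nat) : Int) := by push_cast; ring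
      rw [hcast, ih (j0 + 1) i e _ (by rw [List.length_set]; omega),
        pvH_set (a * d) B (i + j0) (t.length + e) (by omega), pvH_cons]
      ring

/-- Outer loop: the full convolution adds pvH l1 · pvH d2 · 10^e. -/
theorem pvOuter (d2 : List Int) :
    ∀ (l1 : List Int) (i0 e : Nat) (B : List Int), i0 + l1.length + d2.length + e = B.length + 1 →
    pvH ((PySem.List.enumerate l1 (i0 : Int)).foldl (fun b p =>
        (PySem.List.enumerate d2).foldl (fun b q =>
          PySem.List.pySetD b (p.1 + q.1) (PySem.List.pyGetD b (p.1 + q.1) 0 + p.2 * q.2)) b) B)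
      = pvH B + pvH l1 * pvH d2 * 10 ^ e := by
  intro l1
  induction l1 with
  | nil => intro i0 e B h; simp [PySem.List.enumerate_nil, pvH]
  | cons a t ih =>
      intro i0 e B h
      simp only [List.length_cons] at h
      rw [PySem.List.enumerate_cons, List.foldl_cons]
      set B' := (PySem.List.enumerate d2).foldl (fun b q =>
          PySem.List.pySetD b ((i0 : Int) + q.1) (PySem.List.pyGetD b ((i0 : Int) + q.1) 0 + a * q.2)) B with hB'
      have hlen : B'.length = B.length := by
        exact pvLen_foldl _ (fun b q => PySem.List.length_pySetD _ _ _) _ B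
      have hin : pvH B' = pvH B + a * pvH d2 * 10 ^ (t.length + e) := by
        exact pvInner a d2 0 i0 (t.length + e) B (by omega)
      have hcast : ((i0 : Int) + 1) = ((i0 + 1 : Nat) : Int) := by push_cast; ring
      rw [hcast, ih (i0 + 1) e B' (by omega), hin, pvH_cons]
      ring

theorem pvH_replicate : ∀ k : Nat, pvH (List.replicate k 0) = 0 := by
  intro k
  induction k with
  | zero => simp [pvH]
  | succ k ih =>
      rw [List.replicate_succ, pvH_cons, ih]
      ring

/-- The whole of B's buffer phase computes the product of the two Horner values. -/
theorem pvCore (d1 d2 : List Int) :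
    pvH d1 * pvH d2 =
      pvH ((PySem.List.enumerate d1).foldl (fun b p =>
        (PySem.List.enumerate d2).foldl (fun b q =>
          PySem.List.pySetD b (p.1 + q.1) (PySem.List.pyGetD b (p.1 + q.1) 0 + p.2 * q.2)) b)
        (if d1 ≠ [] ∧ d2 ≠ [] then List.replicate (d1.length + d2.length - 1) 0 else [])) := by
  by_cases h1 : d1 = []
  · subst h1
    simp [PySem.List.enumerate_nil, pvH]
  · by_cases h2 : d2 = []
    · subst h2
      rw [if_neg (by simp)]
      have hid : ∀ (l : List (Int × Int)) (B : List Int),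
          (l.foldl (fun b p => (PySem.List.enumerate ([] : List Int)).foldl (fun b q =>
            PySem.List.pySetD b (p.1 + q.1) (PySem.List.pyGetD b (p.1 + q.1) 0 + p.2 * q.2)) b) B) = B := by
        intro l
        induction l with
        | nil => intro B; rfl
        | cons p t ih =>
            intro B
            simp only [List.foldl_cons, PySem.List.enumerate_nil, List.foldl_nil]
            exact ih B
      rw [hid]
      simp [pvH]
    · have hn : 1 ≤ d1.length := by cases d1 with | nil => exact absurd rfl h1 | cons _ _ => simp
      have hm : 1 ≤ d2.length := by cases d2 with | nil => exact absurd rfl h2 | cons _ _ => simp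
      rw [if_pos ⟨h1, h2⟩]
      have h := pvOuter d2 d1 0 0 (List.replicate (d1.length + d2.length - 1) 0)
        (by rw [List.length_replicate]; omega)
      simp only [Nat.cast_zero] at h
      rw [h, pvH_replicate]
      ring

-- ===== VERDICT (by name: the statement is the Claim_ definition above) =====
theorem pvA_horner (s : String) :
    s.toList.foldl (fun acc c => acc * 10 + ((c.toNat : Int) - 48)) 0
      = pvH (s.toList.map (fun c => (c.toNat : Int) - 48)) := by
  simp only [pvH, List.foldl_map]

theorem multiply_ord_spec : Claim_equal_multiply_ord := by
  intro num1 num2 _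
  simp only [Spec_multiply_ord, multiply_ord, multiply_ord_alt]
  rw [pvA_horner num1, pvA_horner num2, pvH_def]
  congr 1
  exact pvCore _ _
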